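-- pv_equiv track=rewrite | github.com/arman10pourmoghim/PubMedGPT | app/evidence.py | classify_study_type
-- ===== SOURCE A (Python) =====
-- from typing import List, Optional
--
-- _CANON = {
--     "Randomized Controlled Trial": "RCT",
--     "Clinical Trial": "Clinical trial",
--     "Meta-Analysis": "Meta-analysis",
--     "Systematic Review": "Systematic review",
--     "Review": "Review",
--     "Cohort Studies": "Cohort",
--     "Case-Control Studies": "Case-control",
--     "Cross-Sectional Studies": "Cross-sectional",
--     "Comparative Study": "Comparative",
--     "Observational Study": "Observational",
--     "Multicenter Study": "Multicenter",
--     "Letter": "Letter",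
--     "Editorial": "Editorial",
-- }
--
-- def classify_study_type(pubtypes: List[str], title: str = "") -> str:
--     """
--     Map PubMed pubtypes (and sometimes title hints) to a concise evidence label.
--     Picks the highest-priority match when multiple types are present.
--     """
--     priority = ["RCT", "Meta-analysis", "Systematic review", "Cohort", "Case-control",
--                 "Cross-sectional", "Clinical trial", "Observational", "Comparative",
--                 "Multicenter", "Review", "Editorial", "Letter"]
--     found = set()
--     for pt in pubtypes or []:
--         if pt in _CANON:
--             found.add(_CANON[pt])
--     tl = (title or "").lower()
--     if "systematic review" in tl:
--         found.add("Systematic review")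
--     if "meta-analysis" in tl or "meta analysis" in tl:
--         found.add("Meta-analysis")
--     for tag in priority:
--         if tag in found:
--             return tag
--     return "Unspecified"
-- ===== SOURCE B (Python) =====
-- _CANON = {
--     "Randomized Controlled Trial": "RCT",
--     "Clinical Trial": "Clinical trial",
--     "Meta-Analysis": "Meta-analysis",
--     "Systematic Review": "Systematic review",
--     "Review": "Review",
--     "Cohort Studies": "Cohort",
--     "Case-Control Studies": "Case-control",
--     "Cross-Sectional Studies": "Cross-sectional",
--     "Comparative Study": "Comparative",
--     "Observational Study": "Observational",
--     "Multicenter Study": "Multicenter",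
--     "Letter": "Letter",
--     "Editorial": "Editorial",
-- }
--
-- _PRIORITY = ["RCT", "Meta-analysis", "Systematic review", "Cohort", "Case-control",
--              "Cross-sectional", "Clinical trial", "Observational", "Comparative",
--              "Multicenter", "Review", "Editorial", "Letter"]
--
-- _RANK = {label: i for i, label in enumerate(_PRIORITY)}
--
-- def classify_study_type(pubtypes, title=""):
--     """Single running-minimum pass over pubtypes using a rank table."""
--     best = len(_PRIORITY)
--     for pt in pubtypes or []:
--         lbl = _CANON.get(pt)
--         if lbl is not None:
--             best = min(best, _RANK[lbl])
--     tl = (title or "").lower()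
--     if "systematic review" in tl:
--         best = min(best, _RANK["Systematic review"])
--     if "meta-analysis" in tl or "meta analysis" in tl:
--         best = min(best, _RANK["Meta-analysis"])
--     return _PRIORITY[best] if best < len(_PRIORITY) else "Unspecified"
-- ===== Notes on version B (the rewrite author's own statement) =====
-- stated objective: simpler
-- what changed: Replaces A's two-phase 'build a set of found labels, then scan the priority list for the first member' with a single running-minimum over a precomputed label-to-rank table, indexing the priority list once at the end.
import Mathlib
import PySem

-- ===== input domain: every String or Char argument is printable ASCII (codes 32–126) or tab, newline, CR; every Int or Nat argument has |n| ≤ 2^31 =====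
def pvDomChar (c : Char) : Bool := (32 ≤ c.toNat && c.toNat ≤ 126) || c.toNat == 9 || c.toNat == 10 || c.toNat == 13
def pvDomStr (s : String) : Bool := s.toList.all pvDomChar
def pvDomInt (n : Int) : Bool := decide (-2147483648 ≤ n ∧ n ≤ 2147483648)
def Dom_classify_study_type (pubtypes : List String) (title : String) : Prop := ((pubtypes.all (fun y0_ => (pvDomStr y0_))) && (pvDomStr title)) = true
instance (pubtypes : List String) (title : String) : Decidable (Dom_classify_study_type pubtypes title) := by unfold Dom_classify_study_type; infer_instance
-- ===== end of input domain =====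

-- B replaces A's "build the set of found labels, then scan the priority list for the
-- first member" by a single running-minimum of ranks from a precomputed rank table
-- (objective: simpler decomposition; same cost).

-- ===== PORT A =====
-- module constant _CANON (shared by both Python files)
def pvCanon : PySem.Dict String String := PySem.Dict.mk [
  ("Randomized Controlled Trial", "RCT"),
  ("Clinical Trial", "Clinical trial"),
  ("Meta-Analysis", "Meta-analysis"),
  ("Systematic Review", "Systematic review"),
  ("Review", "Review"),
  ("Cohort Studies", "Cohort"),
  ("Case-Control Studies", "Case-control"),
  ("Cross-Sectional Studies", "Cross-sectional"),
  ("Comparative Study", "Comparative"),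
  ("Observational Study", "Observational"),
  ("Multicenter Study", "Multicenter"),
  ("Letter", "Letter"),
  ("Editorial", "Editorial")]

def pvPriorityL : List String :=
  ["RCT", "Meta-analysis", "Systematic review", "Cohort", "Case-control",
   "Cross-sectional", "Clinical trial", "Observational", "Comparative",
   "Multicenter", "Review", "Editorial", "Letter"]

-- literal port of A: set of canonical labels, title hints added, first priority hit
def classify_study_type (pubtypes : List String) (title : String) : String :=
  let found : PySem.Set String := pubtypes.foldl (fun s pt =>
      if pvCanon.contains pt then PySem.Set.add s (pvCanon.getD pt "") else s) PySem.Set.empty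
  let tl := PySem.Str.lower title
  let found := if PySem.Str.isIn "systematic review" tl then PySem.Set.add found "Systematic review" else found
  let found := if PySem.Str.isIn "meta-analysis" tl || PySem.Str.isIn "meta analysis" tl then PySem.Set.add found "Meta-analysis" else found
  match pvPriorityL.find? (fun tag => PySem.Set.contains found tag) with
  | some tag => tag
  | none => "Unspecified"

-- ===== PORT B =====
-- _RANK = {label: i for i, label in enumerate(_PRIORITY)}
def pvRank : PySem.Dict String Int :=
  (PySem.List.enumerate pvPriorityL).foldl (fun d p => d.insert p.2 p.1) PySem.Dict.empty

-- literal port of B: single running-minimum of ranks, index the priority list once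
def classify_study_type_alt (pubtypes : List String) (title : String) : String :=
  let best : Int := pubtypes.foldl (fun b pt =>
      match pvCanon.get? pt with
      | some lbl => min b (pvRank.getD lbl 13)
      | none => b) (PySem.List.len pvPriorityL)
  let tl := PySem.Str.lower title
  let best := if PySem.Str.isIn "systematic review" tl then min best (pvRank.getD "Systematic review" 13) else best
  let best := if PySem.Str.isIn "meta-analysis" tl || PySem.Str.isIn "meta analysis" tl then min best (pvRank.getD "Meta-analysis" 13) else best
  if best < PySem.List.len pvPriorityL then (PySem.List.pyGet? pvPriorityL best).getD "Unspecified" else "Unspecified"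

-- ===== PRECONDITION & SPEC =====
def Spec_classify_study_type (pubtypes : List String) (title : String) (out : String) : Prop := out = classify_study_type_alt pubtypes title
instance (pubtypes : List String) (title : String) (out : String) : Decidable (Spec_classify_study_type pubtypes title out) := by unfold Spec_classify_study_type; infer_instance

-- ===== CLAIM (what is proved, stated in full; the proofs are below) =====
def Claim_equal_classify_study_type : Prop := ∀ (pubtypes : List String) (title : String), Dom_classify_study_type pubtypes title → Spec_classify_study_type pubtypes title (classify_study_type pubtypes title)

-- ===== LEMMAS AND PROOFS =====

lemma get?_mk_mem {l : List (String × String)} {k v : String}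
    (h : (PySem.Dict.mk l).get? k = some v) : (k, v) ∈ l := by
  induction l with
  | nil => simp [PySem.Dict.get?] at h
  | cons p rest ih =>
    rw [show p = (p.1, p.2) from rfl, PySem.Dict.get?_mk_cons] at h
    split_ifs at h with hk
    · injection h with hv
      have hkv : (k, v) = (p.1, p.2) := by rw [beq_iff_eq.mp hk, hv]
      rw [hkv]; exact List.mem_cons_self
    · exact List.mem_cons_of_mem _ (ih h)

lemma canon_rank (pt lbl : String) (h : pvCanon.get? pt = some lbl) :
    0 ≤ pvRank.getD lbl 13 ∧ pvRank.getD lbl 13 < 13 ∧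
      PySem.List.pyGet? pvPriorityL (pvRank.getD lbl 13) = some lbl := by
  have hm := get?_mk_mem (l := _) (h := h)
  simp only [List.mem_cons, List.not_mem_nil, or_false] at hm
  rcases hm with h|h|h|h|h|h|h|h|h|h|h|h|h <;>
    (obtain ⟨h1, h2⟩ := Prod.mk.inj h; subst h2; decide)

-- proof-side views of the two loop results, shaped exactly like the ports' bodies
def foundF (l : List String) (hS hM : Bool) : PySem.Set String :=
  let found : PySem.Set String := l.foldl (fun s pt =>
      if pvCanon.contains pt then PySem.Set.add s (pvCanon.getD pt "") else s) PySem.Set.empty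
  let found := if hS then PySem.Set.add found "Systematic review" else found
  if hM then PySem.Set.add found "Meta-analysis" else found

def bestF (l : List String) (hS hM : Bool) : Int :=
  let best : Int := l.foldl (fun b pt =>
      match pvCanon.get? pt with
      | some lbl => min b (pvRank.getD lbl 13)
      | none => b) (PySem.List.len pvPriorityL)
  let best := if hS then min best (pvRank.getD "Systematic review" 13) else best
  if hM then min best (pvRank.getD "Meta-analysis" 13) else best

lemma mem_foldA (l : List String) (s : PySem.Set String) (tag : String) :
    tag ∈ l.foldl (fun s pt =>
      if pvCanon.contains pt then PySem.Set.add s (pvCanon.getD pt "") else s) s ↔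
    tag ∈ s ∨ ∃ pt ∈ l, pvCanon.get? pt = some tag := by
  induction l generalizing s with
  | nil => simp
  | cons pt l ih =>
    simp only [List.foldl_cons, ih, List.mem_cons]
    rw [PySem.Dict.contains_eq_isSome_get?, PySem.Dict.getD_eq_get?_getD]
    cases hc : pvCanon.get? pt with
    | none => simp [hc]
    | some lbl =>
      simp only [Option.isSome_some, if_true, Option.getD_some, PySem.Set.mem_add]
      constructor
      · rintro ((h | rfl) | ⟨q, hq, hg⟩)
        · exact Or.inl h
        · exact Or.inr ⟨pt, Or.inl rfl, hc⟩
        · exact Or.inr ⟨q, Or.inr hq, hg⟩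
      · rintro (h | ⟨q, rfl | hq, hg⟩)
        · exact Or.inl (Or.inl h)
        · rw [hc] at hg
          exact Or.inl (Or.inr (Option.some_inj.mp hg).symm)
        · exact Or.inr ⟨q, hq, hg⟩

lemma mem_foundF (l : List String) (hS hM : Bool) (tag : String) :
    tag ∈ foundF l hS hM ↔
      (∃ pt ∈ l, pvCanon.get? pt = some tag) ∨
      (hS = true ∧ tag = "Systematic review") ∨ (hM = true ∧ tag = "Meta-analysis") := by
  unfold foundF
  cases hS <;> cases hM <;>
    simp [PySem.Set.mem_add, mem_foldA, PySem.Set.empty, or_comm, or_assoc]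

lemma foldB_le_init (l : List String) (b : Int) :
    l.foldl (fun b pt =>
      match pvCanon.get? pt with
      | some lbl => min b (pvRank.getD lbl 13)
      | none => b) b ≤ b := by
  induction l generalizing b with
  | nil => simp
  | cons pt l ih =>
    simp only [List.foldl_cons]
    cases hc : pvCanon.get? pt with
    | none => exact ih b
    | some lbl => exact le_trans (ih _) (min_le_left _ _)

lemma foldB_nonneg (l : List String) (b : Int) (hb : 0 ≤ b) :
    0 ≤ l.foldl (fun b pt =>
      match pvCanon.get? pt with
      | some lbl => min b (pvRank.getD lbl 13)
      | none => b) b := by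
  induction l generalizing b with
  | nil => simpa
  | cons pt l ih =>
    simp only [List.foldl_cons]
    cases hc : pvCanon.get? pt with
    | none => exact ih b hb
    | some lbl =>
      exact ih _ (le_min hb (canon_rank pt lbl hc).1)

lemma foldB_le_of_mem (l : List String) (b : Int) (pt lbl : String)
    (hpt : pt ∈ l) (hc : pvCanon.get? pt = some lbl) :
    l.foldl (fun b pt =>
      match pvCanon.get? pt with
      | some lbl => min b (pvRank.getD lbl 13)
      | none => b) b ≤ pvRank.getD lbl 13 := by
  induction l generalizing b with
  | nil => cases hpt
  | cons q l ih =>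
    simp only [List.foldl_cons]
    rcases List.mem_cons.mp hpt with rfl | hpt
    · rw [hc]
      exact le_trans (foldB_le_init _ _) (min_le_right _ _)
    · exact ih _ hpt

lemma foldB_cases (l : List String) (b : Int) :
    l.foldl (fun b pt =>
      match pvCanon.get? pt with
      | some lbl => min b (pvRank.getD lbl 13)
      | none => b) b = b ∨
    ∃ pt ∈ l, ∃ lbl, pvCanon.get? pt = some lbl ∧
      l.foldl (fun b pt =>
        match pvCanon.get? pt with
        | some lbl => min b (pvRank.getD lbl 13)
        | none => b) b = pvRank.getD lbl 13 := by
  induction l generalizing b with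
  | nil => exact Or.inl rfl
  | cons q l ih =>
    simp only [List.foldl_cons]
    cases hc : pvCanon.get? q with
    | none =>
      rcases ih b with h | ⟨pt, hpt, lbl, hcl, h⟩
      · exact Or.inl h
      · exact Or.inr ⟨pt, List.mem_cons_of_mem _ hpt, lbl, hcl, h⟩
    | some lbl =>
      rcases ih (min b (pvRank.getD lbl 13)) with h | ⟨pt, hpt, lbl2, hcl, h⟩
      · rcases min_cases b (pvRank.getD lbl 13) with ⟨hm, _⟩ | ⟨hm, _⟩
        · exact Or.inl (h.trans hm)
        · exact Or.inr ⟨q, List.mem_cons_self, lbl, hc, h.trans hm⟩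
      · exact Or.inr ⟨pt, List.mem_cons_of_mem _ hpt, lbl2, hcl, h⟩

lemma bestF_nonneg (l : List String) (hS hM : Bool) : 0 ≤ bestF l hS hM := by
  have h0 : (0:Int) ≤ l.foldl (fun b pt =>
      match pvCanon.get? pt with
      | some lbl => min b (pvRank.getD lbl 13)
      | none => b) (PySem.List.len pvPriorityL) := foldB_nonneg l _ (by decide)
  have e2 : pvRank.getD "Systematic review" (13:Int) = 2 := by decide
  have e1 : pvRank.getD "Meta-analysis" (13:Int) = 1 := by decide
  unfold bestF
  split_ifs <;> simp only [e1, e2] <;> omega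

lemma bestF_le_of_mem (l : List String) (hS hM : Bool) (tag : String)
    (h : tag ∈ foundF l hS hM) : bestF l hS hM ≤ pvRank.getD tag 13 := by
  have e2 : pvRank.getD "Systematic review" (13:Int) = 2 := by decide
  have e1 : pvRank.getD "Meta-analysis" (13:Int) = 1 := by decide
  rcases (mem_foundF l hS hM tag).mp h with ⟨pt, hpt, hc⟩ | ⟨hs, rfl⟩ | ⟨hm, rfl⟩
  · have h1 := foldB_le_of_mem l (PySem.List.len pvPriorityL) pt tag hpt hc
    unfold bestF
    split_ifs <;> simp only [e1, e2] <;> omega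
  · unfold bestF
    split_ifs <;> simp only [e1, e2] <;> simp_all
  · unfold bestF
    split_ifs <;> simp only [e1, e2] <;> simp_all

lemma bestF_cases (l : List String) (hS hM : Bool) :
    bestF l hS hM = 13 ∨
    ∃ tag, tag ∈ foundF l hS hM ∧ bestF l hS hM < 13 ∧
      PySem.List.pyGet? pvPriorityL (bestF l hS hM) = some tag := by
  have e2 : pvRank.getD "Systematic review" (13:Int) = 2 := by decide
  have e1 : pvRank.getD "Meta-analysis" (13:Int) = 1 := by decide
  have hS2 : hS = true → "Systematic review" ∈ foundF l hS hM := fun h =>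
    (mem_foundF l hS hM _).mpr (Or.inr (Or.inl ⟨h, rfl⟩))
  have hM1 : hM = true → "Meta-analysis" ∈ foundF l hS hM := fun h =>
    (mem_foundF l hS hM _).mpr (Or.inr (Or.inr ⟨h, rfl⟩))
  have g2 : PySem.List.pyGet? pvPriorityL (2:Int) = some "Systematic review" := by decide
  have g1 : PySem.List.pyGet? pvPriorityL (1:Int) = some "Meta-analysis" := by decide
  have hbase := foldB_cases l (PySem.List.len pvPriorityL)
  have hlen : PySem.List.len pvPriorityL = (13:Int) := by decide
  set b0 := l.foldl (fun b pt =>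
      match pvCanon.get? pt with
      | some lbl => min b (pvRank.getD lbl 13)
      | none => b) (PySem.List.len pvPriorityL) with hb0
  have hbase' : b0 = 13 ∨ ∃ tag, (∃ pt ∈ l, pvCanon.get? pt = some tag) ∧ b0 < 13 ∧
      PySem.List.pyGet? pvPriorityL b0 = some tag := by
    rcases hbase with h | ⟨pt, hpt, lbl, hc, h⟩
    · exact Or.inl (h.trans hlen)
    · obtain ⟨hr0, hr13, hrg⟩ := canon_rank pt lbl hc
      exact Or.inr ⟨lbl, ⟨pt, hpt, hc⟩, by omega, by rw [h]; exact hrg⟩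
  have hmemb : ∀ tag, (∃ pt ∈ l, pvCanon.get? pt = some tag) → tag ∈ foundF l hS hM :=
    fun tag h => (mem_foundF l hS hM tag).mpr (Or.inl h)
  unfold bestF
  rw [← hb0]
  cases hS <;> cases hM <;> simp only [if_true, if_false, Bool.false_eq_true, e1, e2]
  · -- no hints
    rcases hbase' with h | ⟨tag, hm, hlt, hg⟩
    · exact Or.inl h
    · exact Or.inr ⟨tag, hmemb tag hm, hlt, hg⟩
  · -- hM only
    rcases min_cases b0 1 with ⟨hm, hle⟩ | ⟨hm, hlt⟩
    · rw [hm]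
      rcases hbase' with h | ⟨tag, hmm, hlt', hg⟩
      · omega
      · exact Or.inr ⟨tag, hmemb tag hmm, hlt', hg⟩
    · rw [hm]
      exact Or.inr ⟨"Meta-analysis", hM1 rfl, by omega, g1⟩
  · -- hS only
    rcases min_cases b0 2 with ⟨hm, hle⟩ | ⟨hm, hlt⟩
    · rw [hm]
      rcases hbase' with h | ⟨tag, hmm, hlt', hg⟩
      · omega
      · exact Or.inr ⟨tag, hmemb tag hmm, hlt', hg⟩
    · rw [hm]
      exact Or.inr ⟨"Systematic review", hS2 rfl, by omega, g2⟩
  · -- both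
    rcases min_cases (min b0 2) 1 with ⟨hm, hle⟩ | ⟨hm, hlt⟩ <;> rw [hm]
    · rcases min_cases b0 2 with ⟨hm2, hle2⟩ | ⟨hm2, hlt2⟩ <;> rw [hm2]
      · rcases hbase' with h | ⟨tag, hmm, hlt', hg⟩
        · omega
        · exact Or.inr ⟨tag, hmemb tag hmm, hlt', hg⟩
      · exact Or.inr ⟨"Systematic review", hS2 rfl, by omega, g2⟩
    · exact Or.inr ⟨"Meta-analysis", hM1 rfl, by omega, g1⟩

lemma core (l : List String) (hS hM : Bool) :
    (match pvPriorityL.find? (fun tag => PySem.Set.contains (foundF l hS hM) tag) with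
     | some tag => tag
     | none => "Unspecified") =
    (if bestF l hS hM < PySem.List.len pvPriorityL then
      (PySem.List.pyGet? pvPriorityL (bestF l hS hM)).getD "Unspecified" else "Unspecified") := by
  have hno : ∀ tag : String, pvRank.getD tag 13 < bestF l hS hM →
      PySem.Set.contains (foundF l hS hM) tag = false := by
    intro tag hlt
    cases hb : PySem.Set.contains (foundF l hS hM) tag
    · rfl
    · exact absurd (bestF_le_of_mem l hS hM tag (List.mem_of_elem_eq_true hb)) (not_le.mpr hlt)
  rcases bestF_cases l hS hM with hb | ⟨tag, hmem, hlt, hget⟩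
  · -- nothing found: best = 13
    have e0 := hno "RCT" (by rw [hb]; decide)
    have e1 := hno "Meta-analysis" (by rw [hb]; decide)
    have e2 := hno "Systematic review" (by rw [hb]; decide)
    have e3 := hno "Cohort" (by rw [hb]; decide)
    have e4 := hno "Case-control" (by rw [hb]; decide)
    have e5 := hno "Cross-sectional" (by rw [hb]; decide)
    have e6 := hno "Clinical trial" (by rw [hb]; decide)
    have e7 := hno "Observational" (by rw [hb]; decide)
    have e8 := hno "Comparative" (by rw [hb]; decide)
    have e9 := hno "Multicenter" (by rw [hb]; decide)
    have e10 := hno "Review" (by rw [hb]; decide)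
    have e11 := hno "Editorial" (by rw [hb]; decide)
    have e12 := hno "Letter" (by rw [hb]; decide)
    rw [hb]
    simp only [pvPriorityL, List.find?, e0, e1, e2, e3, e4, e5, e6, e7, e8, e9, e10, e11, e12]
    decide
  · have hyes : PySem.Set.contains (foundF l hS hM) tag = true := List.elem_eq_true_of_mem hmem
    have h0 : 0 ≤ bestF l hS hM := bestF_nonneg l hS hM
    set b := bestF l hS hM with hbdef
    interval_cases hbv : b
    · -- b = 0

      rw [show PySem.List.pyGet? pvPriorityL (0:Int) = some "RCT" from by decide] at hget
      injection hget with htag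
      subst htag
      simp only [pvPriorityL, List.find?, hyes]
      decide
    · -- b = 1
      have e0 := hno "RCT" (by decide)
      rw [show PySem.List.pyGet? pvPriorityL (1:Int) = some "Meta-analysis" from by decide] at hget
      injection hget with htag
      subst htag
      simp only [pvPriorityL, List.find?, e0, hyes]
      decide
    · -- b = 2
      have e0 := hno "RCT" (by decide)
      have e1 := hno "Meta-analysis" (by decide)
      rw [show PySem.List.pyGet? pvPriorityL (2:Int) = some "Systematic review" from by decide] at hget
      injection hget with htag
      subst htag
      simp only [pvPriorityL, List.find?, e0, e1, hyes]
      decide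
    · -- b = 3
      have e0 := hno "RCT" (by decide)
      have e1 := hno "Meta-analysis" (by decide)
      have e2 := hno "Systematic review" (by decide)
      rw [show PySem.List.pyGet? pvPriorityL (3:Int) = some "Cohort" from by decide] at hget
      injection hget with htag
      subst htag
      simp only [pvPriorityL, List.find?, e0, e1, e2, hyes]
      decide
    · -- b = 4
      have e0 := hno "RCT" (by decide)
      have e1 := hno "Meta-analysis" (by decide)
      have e2 := hno "Systematic review" (by decide)
      have e3 := hno "Cohort" (by decide)
      rw [show PySem.List.pyGet? pvPriorityL (4:Int) = some "Case-control" from by decide] at hget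
      injection hget with htag
      subst htag
      simp only [pvPriorityL, List.find?, e0, e1, e2, e3, hyes]
      decide
    · -- b = 5
      have e0 := hno "RCT" (by decide)
      have e1 := hno "Meta-analysis" (by decide)
      have e2 := hno "Systematic review" (by decide)
      have e3 := hno "Cohort" (by decide)
      have e4 := hno "Case-control" (by decide)
      rw [show PySem.List.pyGet? pvPriorityL (5:Int) = some "Cross-sectional" from by decide] at hget
      injection hget with htag
      subst htag
      simp only [pvPriorityL, List.find?, e0, e1, e2, e3, e4, hyes]
      decide
    · -- b = 6
      have e0 := hno "RCT" (by decide)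
      have e1 := hno "Meta-analysis" (by decide)
      have e2 := hno "Systematic review" (by decide)
      have e3 := hno "Cohort" (by decide)
      have e4 := hno "Case-control" (by decide)
      have e5 := hno "Cross-sectional" (by decide)
      rw [show PySem.List.pyGet? pvPriorityL (6:Int) = some "Clinical trial" from by decide] at hget
      injection hget with htag
      subst htag
      simp only [pvPriorityL, List.find?, e0, e1, e2, e3, e4, e5, hyes]
      decide
    · -- b = 7
      have e0 := hno "RCT" (by decide)
      have e1 := hno "Meta-analysis" (by decide)
      have e2 := hno "Systematic review" (by decide)
      have e3 := hno "Cohort" (by decide)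
      have e4 := hno "Case-control" (by decide)
      have e5 := hno "Cross-sectional" (by decide)
      have e6 := hno "Clinical trial" (by decide)
      rw [show PySem.List.pyGet? pvPriorityL (7:Int) = some "Observational" from by decide] at hget
      injection hget with htag
      subst htag
      simp only [pvPriorityL, List.find?, e0, e1, e2, e3, e4, e5, e6, hyes]
      decide
    · -- b = 8
      have e0 := hno "RCT" (by decide)
      have e1 := hno "Meta-analysis" (by decide)
      have e2 := hno "Systematic review" (by decide)
      have e3 := hno "Cohort" (by decide)
      have e4 := hno "Case-control" (by decide)
      have e5 := hno "Cross-sectional" (by decide)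
      have e6 := hno "Clinical trial" (by decide)
      have e7 := hno "Observational" (by decide)
      rw [show PySem.List.pyGet? pvPriorityL (8:Int) = some "Comparative" from by decide] at hget
      injection hget with htag
      subst htag
      simp only [pvPriorityL, List.find?, e0, e1, e2, e3, e4, e5, e6, e7, hyes]
      decide
    · -- b = 9
      have e0 := hno "RCT" (by decide)
      have e1 := hno "Meta-analysis" (by decide)
      have e2 := hno "Systematic review" (by decide)
      have e3 := hno "Cohort" (by decide)
      have e4 := hno "Case-control" (by decide)
      have e5 := hno "Cross-sectional" (by decide)
      have e6 := hno "Clinical trial" (by decide)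
      have e7 := hno "Observational" (by decide)
      have e8 := hno "Comparative" (by decide)
      rw [show PySem.List.pyGet? pvPriorityL (9:Int) = some "Multicenter" from by decide] at hget
      injection hget with htag
      subst htag
      simp only [pvPriorityL, List.find?, e0, e1, e2, e3, e4, e5, e6, e7, e8, hyes]
      decide
    · -- b = 10
      have e0 := hno "RCT" (by decide)
      have e1 := hno "Meta-analysis" (by decide)
      have e2 := hno "Systematic review" (by decide)
      have e3 := hno "Cohort" (by decide)
      have e4 := hno "Case-control" (by decide)
      have e5 := hno "Cross-sectional" (by decide)
      have e6 := hno "Clinical trial" (by decide)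
      have e7 := hno "Observational" (by decide)
      have e8 := hno "Comparative" (by decide)
      have e9 := hno "Multicenter" (by decide)
      rw [show PySem.List.pyGet? pvPriorityL (10:Int) = some "Review" from by decide] at hget
      injection hget with htag
      subst htag
      simp only [pvPriorityL, List.find?, e0, e1, e2, e3, e4, e5, e6, e7, e8, e9, hyes]
      decide
    · -- b = 11
      have e0 := hno "RCT" (by decide)
      have e1 := hno "Meta-analysis" (by decide)
      have e2 := hno "Systematic review" (by decide)
      have e3 := hno "Cohort" (by decide)
      have e4 := hno "Case-control" (by decide)
      have e5 := hno "Cross-sectional" (by decide)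
      have e6 := hno "Clinical trial" (by decide)
      have e7 := hno "Observational" (by decide)
      have e8 := hno "Comparative" (by decide)
      have e9 := hno "Multicenter" (by decide)
      have e10 := hno "Review" (by decide)
      rw [show PySem.List.pyGet? pvPriorityL (11:Int) = some "Editorial" from by decide] at hget
      injection hget with htag
      subst htag
      simp only [pvPriorityL, List.find?, e0, e1, e2, e3, e4, e5, e6, e7, e8, e9, e10, hyes]
      decide
    · -- b = 12
      have e0 := hno "RCT" (by decide)
      have e1 := hno "Meta-analysis" (by decide)
      have e2 := hno "Systematic review" (by decide)
      have e3 := hno "Cohort" (by decide)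
      have e4 := hno "Case-control" (by decide)
      have e5 := hno "Cross-sectional" (by decide)
      have e6 := hno "Clinical trial" (by decide)
      have e7 := hno "Observational" (by decide)
      have e8 := hno "Comparative" (by decide)
      have e9 := hno "Multicenter" (by decide)
      have e10 := hno "Review" (by decide)
      have e11 := hno "Editorial" (by decide)
      rw [show PySem.List.pyGet? pvPriorityL (12:Int) = some "Letter" from by decide] at hget
      injection hget with htag
      subst htag
      simp only [pvPriorityL, List.find?, e0, e1, e2, e3, e4, e5, e6, e7, e8, e9, e10, e11, hyes]
      decide


-- ===== VERDICT (by name: the statement is the Claim_ definition above) =====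
theorem classify_study_type_spec : Claim_equal_classify_study_type := by
  intro pubtypes title _
  unfold Spec_classify_study_type classify_study_type classify_study_type_alt
  exact core pubtypes (PySem.Str.isIn "systematic review" (PySem.Str.lower title))
    (PySem.Str.isIn "meta-analysis" (PySem.Str.lower title) ||
      PySem.Str.isIn "meta analysis" (PySem.Str.lower title))
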